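-- pv_equiv track=rewrite | github.com/Chirag-2007/Python-Practice-Questions | Question137.py | check_balloons
-- ===== SOURCE A (Python) =====
-- def check_balloons(balloons):
--     i = 0
--     while i < len(balloons) - 2:
--         if balloons[i] + balloons[i+1] + balloons[i+2] > 60:
--             balloons.pop(i+1)
--             i = 0
--         else:
--             i += 1
--     return balloons
-- ===== SOURCE B (Python) =====
-- # B: single left-to-right stack pass; popping the stack top whenever the top two
-- # plus the incoming element sum over 60 removes the middle of the leftmost bad
-- # triple, exactly what A's restart-from-zero scan does, in O(n) instead of O(n^2).
-- # Like A, mutates the argument list in place and returns it.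
-- def check_balloons(balloons):
--     stack = []
--     for x in balloons:
--         while len(stack) >= 2 and stack[-2] + stack[-1] + x > 60:
--             stack.pop()
--         stack.append(x)
--     balloons[:] = stack
--     return balloons
-- ===== Notes on version B (the rewrite author's own statement) =====
-- stated objective: faster
-- what changed: Replaced A's restart-from-zero rescan (pop middle of leftmost over-60 triple, then i=0) by a single left-to-right stack pass that pops the stack top while the top two plus the incoming element exceed 60.
import Mathlib
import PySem

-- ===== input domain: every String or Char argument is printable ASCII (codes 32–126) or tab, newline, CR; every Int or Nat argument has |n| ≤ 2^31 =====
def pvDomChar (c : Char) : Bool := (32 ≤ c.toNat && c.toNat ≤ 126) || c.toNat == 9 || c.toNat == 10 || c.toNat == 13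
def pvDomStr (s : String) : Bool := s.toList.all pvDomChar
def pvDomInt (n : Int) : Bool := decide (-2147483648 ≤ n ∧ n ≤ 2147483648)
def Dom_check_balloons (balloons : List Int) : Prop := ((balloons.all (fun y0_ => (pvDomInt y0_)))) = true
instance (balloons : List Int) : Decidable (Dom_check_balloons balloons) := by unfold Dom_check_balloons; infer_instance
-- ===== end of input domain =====

-- B replaces A's quadratic restart-from-zero scan by one linear stack pass; equivalence is
-- about the RETURN value (Python A mutates its argument in place, Python B does the same).

-- ===== PORT A =====
-- while i < len-2: if l[i]+l[i+1]+l[i+2] > 60: pop(i+1); i=0 else i+=1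
def check_balloons_loop (l : List Int) (i : Nat) : List Int :=
  if h : (i : Int) < (l.length : Int) - 2 then
    if l.getD i 0 + l.getD (i+1) 0 + l.getD (i+2) 0 > 60 then
      check_balloons_loop (l.eraseIdx (i+1)) 0
    else
      check_balloons_loop l (i+1)
  else l
termination_by (l.length, l.length - i)
decreasing_by
  · have : (l.eraseIdx (i+1)).length = l.length - 1 := by
      rw [List.length_eraseIdx_of_lt (by omega)]
    simp only [Prod.lex_iff]; omega
  · apply Prod.Lex.right
    omega

def check_balloons (balloons : List Int) : List Int := check_balloons_loop balloons 0

-- ===== PORT B =====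
-- the stack is kept reversed (head = top); while len(stack)>=2 and stack[-2]+stack[-1]+x>60: stack.pop()
def check_balloons_pop (rst : List Int) (x : Int) : List Int :=
  match rst with
  | b :: a :: rest => if a + b + x > 60 then check_balloons_pop (a :: rest) x else b :: a :: rest
  | _ => rst

def check_balloons_alt (balloons : List Int) : List Int :=
  (balloons.foldl (fun rst x => x :: check_balloons_pop rst x) []).reverse

-- ===== PRECONDITION & SPEC =====
def Spec_check_balloons (balloons : List Int) (out : List Int) : Prop := out = check_balloons_alt balloons
instance (balloons : List Int) (out : List Int) : Decidable (Spec_check_balloons balloons out) := by unfold Spec_check_balloons; infer_instance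

-- ===== CLAIM (what is proved, stated in full; the proofs are below) =====
def Claim_equal_check_balloons : Prop := ∀ (balloons : List Int), Dom_check_balloons balloons → Spec_check_balloons balloons (check_balloons balloons)

-- ===== LEMMAS AND PROOFS =====

-- all consecutive triples of l starting strictly below i sum to ≤ 60
def GoodBelow (l : List Int) (i : Nat) : Prop :=
  ∀ j, j < i → j + 2 < l.length → l.getD j 0 + l.getD (j+1) 0 + l.getD (j+2) 0 ≤ 60

def Good (l : List Int) : Prop := GoodBelow l l.length

theorem loop_of_good (l : List Int) (i : Nat) (hg : Good l) :
    check_balloons_loop l i = l := by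
  induction l, i using check_balloons_loop.induct with
  | case1 l i h hbad ih =>
    exact absurd (hg i (by omega) (by omega)) (by omega)
  | case2 l i h hgood ih =>
    rw [check_balloons_loop]
    simp only [h, dite_true, if_neg (by omega : ¬ (l.getD i 0 + l.getD (i+1) 0 + l.getD (i+2) 0 > 60))]
    exact ih hg
  | case3 l i h =>
    rw [check_balloons_loop]
    simp [h]

theorem loop_append : ∀ (k : Nat) (p : List Int) (x : Int) (i : Nat),
    p.length * (p.length + 2) + (p.length - i) ≤ k →
    i + 2 ≤ p.length → GoodBelow p i →
    check_balloons_loop (p ++ [x]) i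
      = (check_balloons_pop (check_balloons_loop p i).reverse x).reverse ++ [x] := by
  intro k
  induction k with
  | zero =>
    intro p x i hk hle hg
    have : 0 < p.length * (p.length + 2) := Nat.mul_pos (by omega) (by omega)
    omega
  | succ k ih =>
    intro p x i hk hle hg
    have hguard : ((i : Int) < ((p ++ [x]).length : Int) - 2) ↔ (i + 2 < p.length + 1) := by
      simp only [List.length_append, List.length_singleton]; push_cast; omega
    by_cases hc : i + 2 < p.length
    · -- the examined triple lies wholly inside p
      have e1 : (p ++ [x]).getD i 0 = p.getD i 0 := List.getD_append _ _ _ _ (by omega)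
      have e2 : (p ++ [x]).getD (i+1) 0 = p.getD (i+1) 0 := List.getD_append _ _ _ _ (by omega)
      have e3 : (p ++ [x]).getD (i+2) 0 = p.getD (i+2) 0 := List.getD_append _ _ _ _ (by omega)
      by_cases hbad : p.getD i 0 + p.getD (i+1) 0 + p.getD (i+2) 0 > 60
      · rw [check_balloons_loop, dif_pos (hguard.mpr (by omega)), e1, e2, e3, if_pos hbad,
          List.eraseIdx_append_of_lt_length (by omega)]
        conv_rhs => rw [check_balloons_loop, dif_pos (show (i:Int) < (p.length:Int) - 2 by push_cast; omega), if_pos hbad]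
        have hlen' : (p.eraseIdx (i+1)).length = p.length - 1 :=
          List.length_eraseIdx_of_lt (by omega)
        refine ih (p.eraseIdx (i+1)) x 0 ?_ (by omega) (by intro j hj _; omega)
        rw [hlen']
        have e : p.length - 1 + 2 = p.length + 1 := by omega
        rw [e]
        have h1 : (p.length - 1) * (p.length + 1) ≤ p.length * (p.length + 1) :=
          Nat.mul_le_mul_right _ (by omega)
        have h2 : p.length * (p.length + 1) + p.length = p.length * (p.length + 2) := by ring
        omega
      · rw [check_balloons_loop, dif_pos (hguard.mpr (by omega)), e1, e2, e3, if_neg hbad]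
        conv_rhs => rw [check_balloons_loop, dif_pos (show (i:Int) < (p.length:Int) - 2 by push_cast; omega), if_neg hbad]
        refine ih p x (i+1) (by omega) (by omega) ?_
        intro j hj hj2
        by_cases hji : j < i
        · exact hg j hji hj2
        · have : j = i := by omega
          subst this; omega
    · -- i + 2 = p.length : the triple ends in x
      have hi2 : i + 2 = p.length := by omega
      rcases hp : p.reverse with _ | ⟨b, t⟩
      · exfalso
        have hpn : p = [] := by simpa using congrArg List.reverse hp
        rw [hpn] at hle; simp at hle
      rcases ht : t with _ | ⟨a, r⟩
      · exfalso
        have hl1 : p.length = 1 := by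
          rw [ht] at hp
          have := congrArg List.length hp
          simpa using this
        omega
      subst ht
      have hp2 : p = r.reverse ++ [a, b] := by
        have := congrArg List.reverse hp; simpa using this
      have hq : r.reverse.length = i := by
        have := congrArg List.length hp2
        simp only [List.length_reverse] at this ⊢
        simp at this
        omega
      have hassoc : p ++ [x] = r.reverse ++ [a, b, x] := by
        rw [hp2]; simp
      have g1 : (p ++ [x]).getD i 0 = a := by
        rw [hassoc, List.getD_append_right _ _ _ _ (by omega)]
        simp [hq]
      have g2 : (p ++ [x]).getD (i+1) 0 = b := by
        rw [hassoc, List.getD_append_right _ _ _ _ (by omega)]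
        have : i + 1 - r.reverse.length = 1 := by omega
        rw [this]; rfl
      have g3 : (p ++ [x]).getD (i+2) 0 = x := by
        rw [hassoc, List.getD_append_right _ _ _ _ (by omega)]
        have : i + 2 - r.reverse.length = 2 := by omega
        rw [this]; rfl
      have hloopp : check_balloons_loop p i = p := by
        rw [check_balloons_loop, dif_neg (by omega)]
      by_cases hbx : a + b + x > 60
      · rw [check_balloons_loop, dif_pos (hguard.mpr (by omega)), g1, g2, g3, if_pos hbx]
        have herase : (p ++ [x]).eraseIdx (i+1) = (r.reverse ++ [a]) ++ [x] := by
          rw [hassoc, List.eraseIdx_append_of_length_le (by omega)]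
          have : i + 1 - r.reverse.length = 1 := by omega
          rw [this]; simp
        rw [herase, hloopp, hp]
        rw [show check_balloons_pop (b :: a :: r) x = check_balloons_pop (a :: r) x from by
          rw [check_balloons_pop, if_pos hbx]]
        have har : a :: r = (r.reverse ++ [a]).reverse := by simp
        by_cases hr0 : r = []
        · -- q = [], i.e. i = 0 : p = [a, b]
          subst hr0
          simp only [List.reverse_nil, List.nil_append]
          have h1 : check_balloons_loop ([a] ++ [x]) 0 = [a] ++ [x] := by
            rw [check_balloons_loop, dif_neg (by norm_num)]
          have h2 : check_balloons_pop [a] x = [a] := rfl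
          rw [h1, h2]
          simp
        · -- q nonempty : recurse via ih on r.reverse ++ [a]
          rw [har]
          have hrpos : 0 < r.length := List.length_pos_iff.mpr hr0
          have hgq : Good (r.reverse ++ [a]) := by
            intro j hj hj2
            have hlq : (r.reverse ++ [a]).length = i + 1 := by simp [hq]
            rw [hlq] at hj hj2
            have hsub : ∀ t, t < i + 1 → (r.reverse ++ [a]).getD t 0 = p.getD t 0 := by
              intro t htl
              rw [hp2]
              rw [show r.reverse ++ [a, b] = (r.reverse ++ [a]) ++ [b] from by simp]
              exact (List.getD_append _ _ _ _ (by
                simp only [List.length_append, List.length_singleton, hq]; omega)).symm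
            rw [hsub j (by omega), hsub (j+1) (by omega), hsub (j+2) (by omega)]
            exact hg j (by omega) (by omega)
          have hloopq : check_balloons_loop (r.reverse ++ [a]) 0 = r.reverse ++ [a] :=
            loop_of_good _ _ hgq
          have hlq : (r.reverse ++ [a]).length = i + 1 := by
            simp only [List.length_append, List.length_singleton, hq]
          have hmeas : (r.reverse ++ [a]).length * ((r.reverse ++ [a]).length + 2)
              + ((r.reverse ++ [a]).length - 0) ≤ k := by
            rw [hlq]
            have hplen : p.length = i + 2 := by omega
            rw [hplen] at hk
            have h2 : (i+1) * (i+1+2) + (2*i+5) = (i+2) * (i+2+2) := by ring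
            omega
          rw [ih (r.reverse ++ [a]) x 0 hmeas (by simp; omega) (by intro j hj hj2; omega), hloopq]
      · rw [check_balloons_loop, dif_pos (hguard.mpr (by omega)), g1, g2, g3, if_neg hbx]
        rw [check_balloons_loop, dif_neg (by simp; omega)]
        rw [hloopp, hp]
        rw [show check_balloons_pop (b :: a :: r) x = b :: a :: r from by
          rw [check_balloons_pop, if_neg hbx]]
        rw [← hp]
        simp

theorem check_balloons_eq (l : List Int) : check_balloons l = check_balloons_alt l := by
  induction l using List.reverseRecOn with
  | nil =>
    rw [check_balloons, check_balloons_alt, check_balloons_loop, dif_neg (by norm_num)]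
    rfl
  | append_singleton p x ih =>
    have hS : p.foldl (fun rst x => x :: check_balloons_pop rst x) [] = (check_balloons p).reverse := by
      rw [ih, check_balloons_alt, List.reverse_reverse]
    rw [check_balloons_alt, List.foldl_append, List.foldl_cons, List.foldl_nil, hS,
      List.reverse_cons]
    rcases p with _ | ⟨a, _ | ⟨b, t⟩⟩
    · rw [show check_balloons ([] ++ [x]) = [x] from by
        rw [check_balloons, check_balloons_loop, dif_neg (by norm_num)]
        rfl]
      rw [show check_balloons ([] : List Int) = [] from by
        rw [check_balloons, check_balloons_loop, dif_neg (by norm_num)]]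
      rfl
    · rw [show check_balloons ([a] ++ [x]) = [a, x] from by
        rw [check_balloons, check_balloons_loop, dif_neg (by norm_num)]
        rfl]
      rw [show check_balloons [a] = [a] from by
        rw [check_balloons, check_balloons_loop, dif_neg (by norm_num)]]
      rfl
    · rw [check_balloons, check_balloons,
        loop_append ((a :: b :: t).length * ((a :: b :: t).length + 2) + (a :: b :: t).length)
          (a :: b :: t) x 0 (by omega) (by simp) (by intro j hj _; omega)]

-- ===== VERDICT (by name: the statement is the Claim_ definition above) =====
theorem check_balloons_spec : Claim_equal_check_balloons := by
  intro balloons _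
  exact check_balloons_eq balloons
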